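-- pv_equiv track=rewrite | github.com/deekshithr999/Codes | strings_practice/dist_bw_2_words.py | distbw2words
-- ===== SOURCE A (Python) =====
-- def distbw2words(lst: list[str], word_lst: list[str]):
--     import sys
--     mini = sys.maxsize
--     w1idx =-1
--     w2idx = -1
--
--     for i in range(len(lst)):
--         if lst[i] == word_lst[0]:
--             w1idx = i
--         elif lst[i] == word_lst[1]:
--             w2idx = i
--
--         if w1idx != -1 and w2idx != -1:
--             mini = min(mini, abs(w1idx-w2idx))
--
--     return mini
-- ===== SOURCE B (Python) =====
-- def distbw2words(lst: list[str], word_lst: list[str]):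
--     best = 2**63 - 1  # sys.maxsize
--     if not lst:
--         return best
--     w1, w2 = word_lst[0], word_lst[1]
--     idx1 = [i for i, x in enumerate(lst) if x == w1]
--     idx2 = [i for i, x in enumerate(lst) if x == w2 and x != w1]
--     p, q = 0, 0
--     while p < len(idx1) and q < len(idx2):
--         best = min(best, abs(idx1[p] - idx2[q]))
--         if idx1[p] < idx2[q]:
--             p += 1
--         else:
--             q += 1
--     return best
-- ===== Notes on version B (the rewrite author's own statement) =====
-- stated objective: alternative
-- what changed: A is a single stateful scan tracking the latest index of each word and re-minimizing every step; B builds the two sorted occurrence-index lists in one pass each and then merges them with a two-pointer walk that only compares adjacent cross occurrences.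
-- outside the precondition, e.g. on distbw2words(['a'], ['a']): A returns 9223372036854775807, B raises IndexError
import Mathlib
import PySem

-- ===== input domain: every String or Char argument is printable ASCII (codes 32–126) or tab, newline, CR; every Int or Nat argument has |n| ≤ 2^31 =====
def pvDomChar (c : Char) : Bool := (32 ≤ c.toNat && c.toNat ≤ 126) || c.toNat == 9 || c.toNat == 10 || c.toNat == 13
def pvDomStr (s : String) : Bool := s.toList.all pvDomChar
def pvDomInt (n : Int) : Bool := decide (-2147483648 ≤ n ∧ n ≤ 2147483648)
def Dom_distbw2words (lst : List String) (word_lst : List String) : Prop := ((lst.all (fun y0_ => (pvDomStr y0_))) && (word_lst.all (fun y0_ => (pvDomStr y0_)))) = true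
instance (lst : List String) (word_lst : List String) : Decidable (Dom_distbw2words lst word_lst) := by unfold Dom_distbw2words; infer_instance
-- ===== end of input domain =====

-- B replaces A's single stateful latest-index scan with: collect the two sorted occurrence-index
-- lists, then a two-pointer merge over them; same value, same O(n) cost (objective: alternative).

-- ===== PORT A =====
def distbw2words (lst : List String) (word_lst : List String) : Int :=
  let maxsize : Int := 9223372036854775807
  let st :=
    (PySem.List.pyRange 0 (lst.length : Int) 1).foldl
      (fun (st : Int × Int × Int) i =>
        let x := PySem.List.pyGetD lst i ""
        let w :=
          if x = PySem.List.pyGetD word_lst 0 "" then (i, st.2.2)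
          else if x = PySem.List.pyGetD word_lst 1 "" then (st.2.1, i)
          else (st.2.1, st.2.2)
        let mini := if w.1 ≠ -1 ∧ w.2 ≠ -1 then min st.1 |w.1 - w.2| else st.1
        (mini, w.1, w.2))
      (maxsize, -1, -1)
  st.1

-- ===== PORT B =====
-- the while loop of Source B with pointers p, q, transcribed as recursion on the two suffixes
def tpLoop : Int → List Int → List Int → Int
  | best, i :: is, j :: js =>
      let best' := min best |i - j|
      if i < j then tpLoop best' is (j :: js) else tpLoop best' (i :: is) js
  | best, _, _ => best
termination_by _best is js => is.length + js.length

def distbw2words_alt (lst : List String) (word_lst : List String) : Int :=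
  let best : Int := 9223372036854775807
  if lst = [] then best
  else
    let w1 := PySem.List.pyGetD word_lst 0 ""
    let w2 := PySem.List.pyGetD word_lst 1 ""
    let idx1 := (PySem.List.enumerate lst 0).filterMap
      (fun p => if p.2 = w1 then some p.1 else none)
    let idx2 := (PySem.List.enumerate lst 0).filterMap
      (fun p => if p.2 = w2 ∧ ¬ p.2 = w1 then some p.1 else none)
    tpLoop best idx1 idx2

-- ===== PRECONDITION & SPEC =====
-- Pre_ excludes word lists with fewer than two entries meeting a non-empty lst: there A raises
-- IndexError on the first element differing from word_lst[0], and on the remaining corner (a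
-- one-word word_lst matching every element, where A returns maxsize only because the elif is
-- never reached) B's natural word_lst[1] access raises IndexError.
def Pre_distbw2words (lst : List String) (word_lst : List String) : Prop :=
  lst = [] ∨ 2 ≤ word_lst.length
instance (lst : List String) (word_lst : List String) : Decidable (Pre_distbw2words lst word_lst) := by
  unfold Pre_distbw2words; infer_instance

def pvWitness_distbw2words : List String × List String := (["a", "b", "a"], ["a", "b"])

def Spec_distbw2words (lst : List String) (word_lst : List String) (out : Int) : Prop := out = distbw2words_alt lst word_lst
instance (lst : List String) (word_lst : List String) (out : Int) : Decidable (Spec_distbw2words lst word_lst out) := by unfold Spec_distbw2words; infer_instance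

-- ===== CLAIM (what is proved, stated in full; the proofs are below) =====
def Claim_equal_distbw2words : Prop := ∀ (lst : List String) (word_lst : List String), Dom_distbw2words lst word_lst → Pre_distbw2words lst word_lst → Spec_distbw2words lst word_lst (distbw2words lst word_lst)

-- ===== LEMMAS AND PROOFS =====

-- abbreviations for the proof
def pvM : Int := 9223372036854775807

def pvStep (lst word_lst : List String) (st : Int × Int × Int) (i : Int) : Int × Int × Int :=
  let x := PySem.List.pyGetD lst i ""
  let w :=
    if x = PySem.List.pyGetD word_lst 0 "" then (i, st.2.2)
    else if x = PySem.List.pyGetD word_lst 1 "" then (st.2.1, i)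
    else (st.2.1, st.2.2)
  let mini := if w.1 ≠ -1 ∧ w.2 ≠ -1 then min st.1 |w.1 - w.2| else st.1
  (mini, w.1, w.2)

def pvFoldA (lst word_lst : List String) (n : Nat) : Int × Int × Int :=
  (PySem.List.pyRange 0 (n : Int) 1).foldl (pvStep lst word_lst) (pvM, -1, -1)

lemma distbw2words_eq_fold (lst word_lst : List String) :
    distbw2words lst word_lst = (pvFoldA lst word_lst lst.length).1 := rfl

lemma pvFoldA_zero (lst word_lst : List String) : pvFoldA lst word_lst 0 = (pvM, -1, -1) := by
  unfold pvFoldA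
  rw [PySem.List.pyRange_one_eq_nil (by omega)]
  rfl

lemma pvFoldA_succ (lst word_lst : List String) (n : Nat) :
    pvFoldA lst word_lst (n + 1) = pvStep lst word_lst (pvFoldA lst word_lst n) (n : Int) := by
  unfold pvFoldA
  rw [show ((n + 1 : Nat) : Int) = (n : Int) + 1 by push_cast; ring,
    PySem.List.pyRange_one_succ_right (by positivity), List.foldl_append]
  rfl

-- the two match predicates of A's if/elif (w1-match, and w2-match that is not a w1-match)
def pvP1 (lst word_lst : List String) (k : Nat) : Prop :=
  lst.getD k "" = PySem.List.pyGetD word_lst 0 ""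
def pvP2 (lst word_lst : List String) (k : Nat) : Prop :=
  ¬ pvP1 lst word_lst k ∧ lst.getD k "" = PySem.List.pyGetD word_lst 1 ""

lemma pv_abs_of_le {a b : Int} (h : a ≤ b) : |a - b| = b - a := by
  rw [abs_sub_comm]; exact abs_of_nonneg (by omega)

-- the loop invariant of A: w1idx/w2idx are the last matching indices (or -1), and mini is
-- maxsize-or-a-cross-pair-distance that is ≤ maxsize and ≤ every cross pair distance so far
lemma pvInv (lst word_lst : List String) (n : Nat) :
    (((pvFoldA lst word_lst n).2.1 = -1 ∧ ∀ k, k < n → ¬ pvP1 lst word_lst k) ∨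
      (∃ k, k < n ∧ pvP1 lst word_lst k ∧ (pvFoldA lst word_lst n).2.1 = (k : Int) ∧
        ∀ k', k < k' → k' < n → ¬ pvP1 lst word_lst k')) ∧
    (((pvFoldA lst word_lst n).2.2 = -1 ∧ ∀ k, k < n → ¬ pvP2 lst word_lst k) ∨
      (∃ k, k < n ∧ pvP2 lst word_lst k ∧ (pvFoldA lst word_lst n).2.2 = (k : Int) ∧
        ∀ k', k < k' → k' < n → ¬ pvP2 lst word_lst k')) ∧
    ((pvFoldA lst word_lst n).1 ≤ pvM) ∧
    ((pvFoldA lst word_lst n).1 = pvM ∨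
      ∃ i j : Nat, i < n ∧ j < n ∧ pvP1 lst word_lst i ∧ pvP2 lst word_lst j ∧
        (pvFoldA lst word_lst n).1 = |(i : Int) - (j : Int)|) ∧
    (∀ i j : Nat, i < n → j < n → pvP1 lst word_lst i → pvP2 lst word_lst j →
      (pvFoldA lst word_lst n).1 ≤ |(i : Int) - (j : Int)|) := by
  induction n with
  | zero =>
      rw [pvFoldA_zero]
      refine ⟨Or.inl ⟨rfl, by omega⟩, Or.inl ⟨rfl, by omega⟩, le_refl _, Or.inl rfl, by omega⟩
  | succ n ih =>
      obtain ⟨C1, C2, C3, C4, C5⟩ := ih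
      rw [pvFoldA_succ]
      set st := pvFoldA lst word_lst n with hst
      unfold pvStep
      simp only [PySem.List.pyGetD_natCast]
      by_cases h1 : lst.getD n "" = PySem.List.pyGetD word_lst 0 ""
      · -- p1 n : w1idx := n
        have hp1n : pvP1 lst word_lst n := h1
        have hnp2n : ¬ pvP2 lst word_lst n := fun h => h.1 h1
        simp only [if_pos h1]
        rcases C2 with ⟨hb, hnone⟩ | ⟨k2, hk2n, hp2k2, hbk2, hmax2⟩
        · -- no w2 match yet: mini unchanged
          have hcond : ¬ (((n : Int) ≠ -1) ∧ st.2.2 ≠ -1) := by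
            rw [hb]; simp
          rw [if_neg hcond]
          refine ⟨Or.inr ⟨n, by omega, hp1n, rfl, by omega⟩,
            Or.inl ⟨hb, ?_⟩, C3, ?_, ?_⟩
          · intro k hk
            rcases Nat.lt_succ_iff_lt_or_eq.mp hk with h | h
            · exact hnone k h
            · subst h; exact hnp2n
          · rcases C4 with h | ⟨i, j, hi, hj, hpi, hpj, hv⟩
            · exact Or.inl h
            · exact Or.inr ⟨i, j, by omega, by omega, hpi, hpj, hv⟩
          · intro i j hi hj hpi hpj
            have hjn : j < n := by
              rcases Nat.lt_succ_iff_lt_or_eq.mp hj with h | h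
              · exact h
              · exact absurd hpj (h ▸ hnp2n)
            exact absurd hpj (hnone j hjn)
        · -- last w2 match is k2: mini := min mini |n - k2|
          have hcond : (((n : Int) ≠ -1) ∧ st.2.2 ≠ -1) := by
            constructor
            · omega
            · rw [hbk2]; omega
          rw [if_pos hcond, hbk2]
          refine ⟨Or.inr ⟨n, by omega, hp1n, rfl, by omega⟩,
            Or.inr ⟨k2, by omega, hp2k2, rfl, ?_⟩, ?_, ?_, ?_⟩
          · intro k' hk' hk'n
            rcases Nat.lt_succ_iff_lt_or_eq.mp hk'n with h | h
            · exact hmax2 k' hk' h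
            · subst h; exact hnp2n
          · exact le_trans (min_le_left _ _) C3
          · rcases min_cases st.1 |(n : Int) - (k2 : Int)| with ⟨hmin, _⟩ | ⟨hmin, _⟩
            · rw [hmin]
              rcases C4 with h | ⟨i, j, hi, hj, hpi, hpj, hv⟩
              · exact Or.inl h
              · exact Or.inr ⟨i, j, by omega, by omega, hpi, hpj, hv⟩
            · rw [hmin]
              exact Or.inr ⟨n, k2, by omega, by omega, hp1n, hp2k2, rfl⟩
          · intro i j hi hj hpi hpj
            have hjn : j < n := by
              rcases Nat.lt_succ_iff_lt_or_eq.mp hj with h | h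
              · exact h
              · exact absurd hpj (h ▸ hnp2n)
            rcases Nat.lt_succ_iff_lt_or_eq.mp hi with hin | hin
            · exact le_trans (min_le_left _ _) (C5 i j hin hjn hpi hpj)
            · subst hin
              have hjk2 : j ≤ k2 := by
                by_contra hc
                exact hmax2 j (by omega) hjn hpj
              have e1 : |(i : Int) - (k2 : Int)| = (i : Int) - (k2 : Int) := by
                rw [abs_sub_comm]; exact pv_abs_of_le (by exact_mod_cast Nat.le_of_lt hk2n)
              have e2 : |(i : Int) - (j : Int)| = (i : Int) - (j : Int) := by
                rw [abs_sub_comm]; exact pv_abs_of_le (by exact_mod_cast (by omega : j ≤ i))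
              have := min_le_right st.1 |(i : Int) - (k2 : Int)|
              rw [e1] at this; rw [e2]
              have hcast : ((j : Int)) ≤ (k2 : Int) := by exact_mod_cast hjk2
              omega
      · by_cases h2 : lst.getD n "" = PySem.List.pyGetD word_lst 1 ""
        · -- p2 n : w2idx := n
          have hp2n : pvP2 lst word_lst n := ⟨h1, h2⟩
          have hnp1n : ¬ pvP1 lst word_lst n := h1
          simp only [if_neg h1, if_pos h2]
          rcases C1 with ⟨ha, hnone⟩ | ⟨k1, hk1n, hp1k1, hak1, hmax1⟩
          · have hcond : ¬ (st.2.1 ≠ -1 ∧ ((n : Int) ≠ -1)) := by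
              rw [ha]; simp
            rw [if_neg hcond]
            refine ⟨Or.inl ⟨ha, ?_⟩,
              Or.inr ⟨n, by omega, hp2n, rfl, by omega⟩, C3, ?_, ?_⟩
            · intro k hk
              rcases Nat.lt_succ_iff_lt_or_eq.mp hk with h | h
              · exact hnone k h
              · subst h; exact hnp1n
            · rcases C4 with h | ⟨i, j, hi, hj, hpi, hpj, hv⟩
              · exact Or.inl h
              · exact Or.inr ⟨i, j, by omega, by omega, hpi, hpj, hv⟩
            · intro i j hi hj hpi hpj
              have hin : i < n := by
                rcases Nat.lt_succ_iff_lt_or_eq.mp hi with h | h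
                · exact h
                · exact absurd hpi (h ▸ hnp1n)
              exact absurd hpi (hnone i hin)
          · have hcond : (st.2.1 ≠ -1 ∧ ((n : Int) ≠ -1)) := by
              constructor
              · rw [hak1]; omega
              · omega
            rw [if_pos hcond, hak1]
            refine ⟨Or.inr ⟨k1, by omega, hp1k1, rfl, ?_⟩,
              Or.inr ⟨n, by omega, hp2n, rfl, by omega⟩, ?_, ?_, ?_⟩
            · intro k' hk' hk'n
              rcases Nat.lt_succ_iff_lt_or_eq.mp hk'n with h | h
              · exact hmax1 k' hk' h
              · subst h; exact hnp1n
            · exact le_trans (min_le_left _ _) C3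
            · rcases min_cases st.1 |(k1 : Int) - (n : Int)| with ⟨hmin, _⟩ | ⟨hmin, _⟩
              · rw [hmin]
                rcases C4 with h | ⟨i, j, hi, hj, hpi, hpj, hv⟩
                · exact Or.inl h
                · exact Or.inr ⟨i, j, by omega, by omega, hpi, hpj, hv⟩
              · rw [hmin]
                exact Or.inr ⟨k1, n, by omega, by omega, hp1k1, hp2n, rfl⟩
            · intro i j hi hj hpi hpj
              have hin : i < n := by
                rcases Nat.lt_succ_iff_lt_or_eq.mp hi with h | h
                · exact h
                · exact absurd hpi (h ▸ hnp1n)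
              rcases Nat.lt_succ_iff_lt_or_eq.mp hj with hjn | hjn
              · exact le_trans (min_le_left _ _) (C5 i j hin hjn hpi hpj)
              · subst hjn
                have hik1 : i ≤ k1 := by
                  by_contra hc
                  exact hmax1 i (by omega) hin hpi
                have e1 : |(k1 : Int) - (j : Int)| = (j : Int) - (k1 : Int) :=
                  pv_abs_of_le (by exact_mod_cast Nat.le_of_lt hk1n)
                have e2 : |(i : Int) - (j : Int)| = (j : Int) - (i : Int) :=
                  pv_abs_of_le (by exact_mod_cast (by omega : i ≤ j))
                have := min_le_right st.1 |(k1 : Int) - (j : Int)|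
                rw [e1] at this; rw [e2]
                have hcast : ((i : Int)) ≤ (k1 : Int) := by exact_mod_cast hik1
                omega
        · -- no match at n: indices unchanged, and mini unchanged too
          have hnp1n : ¬ pvP1 lst word_lst n := h1
          have hnp2n : ¬ pvP2 lst word_lst n := fun h => h2 h.2
          simp only [if_neg h1, if_neg h2]
          have hmini : (if st.2.1 ≠ -1 ∧ st.2.2 ≠ -1 then min st.1 |st.2.1 - st.2.2| else st.1) = st.1 := by
            split_ifs with hc
            · rcases C1 with ⟨ha, _⟩ | ⟨k1, hk1n, hp1k1, hak1, _⟩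
              · exact absurd ha hc.1
              · rcases C2 with ⟨hb, _⟩ | ⟨k2, hk2n, hp2k2, hbk2, _⟩
                · exact absurd hb hc.2
                · rw [hak1, hbk2]
                  exact min_eq_left (C5 k1 k2 hk1n hk2n hp1k1 hp2k2)
            · rfl
          rw [hmini]
          have ext1 : ∀ (P : Nat → Prop), ¬ P n → (∀ k, k < n → ¬ P k) → ∀ k, k < n + 1 → ¬ P k := by
            intro P hPn hP k hk
            rcases Nat.lt_succ_iff_lt_or_eq.mp hk with h | h
            · exact hP k h
            · subst h; exact hPn
          refine ⟨?_, ?_, C3, ?_, ?_⟩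
          · rcases C1 with ⟨ha, hnone⟩ | ⟨k1, hk1n, hp1k1, hak1, hmax1⟩
            · exact Or.inl ⟨ha, ext1 _ hnp1n hnone⟩
            · refine Or.inr ⟨k1, by omega, hp1k1, hak1, ?_⟩
              intro k' hk' hk'n
              rcases Nat.lt_succ_iff_lt_or_eq.mp hk'n with h | h
              · exact hmax1 k' hk' h
              · subst h; exact hnp1n
          · rcases C2 with ⟨hb, hnone⟩ | ⟨k2, hk2n, hp2k2, hbk2, hmax2⟩
            · exact Or.inl ⟨hb, ext1 _ hnp2n hnone⟩
            · refine Or.inr ⟨k2, by omega, hp2k2, hbk2, ?_⟩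
              intro k' hk' hk'n
              rcases Nat.lt_succ_iff_lt_or_eq.mp hk'n with h | h
              · exact hmax2 k' hk' h
              · subst h; exact hnp2n
          · rcases C4 with h | ⟨i, j, hi, hj, hpi, hpj, hv⟩
            · exact Or.inl h
            · exact Or.inr ⟨i, j, by omega, by omega, hpi, hpj, hv⟩
          · intro i j hi hj hpi hpj
            have hin : i < n := by
              rcases Nat.lt_succ_iff_lt_or_eq.mp hi with h | h
              · exact h
              · exact absurd hpi (h ▸ hnp1n)
            have hjn : j < n := by
              rcases Nat.lt_succ_iff_lt_or_eq.mp hj with h | h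
              · exact h
              · exact absurd hpj (h ▸ hnp2n)
            exact C5 i j hin hjn hpi hpj

-- ----- B side -----

lemma tp_le_best : ∀ (best : Int) (xs ys : List Int), tpLoop best xs ys ≤ best := by
  intro best xs ys
  induction best, xs, ys using tpLoop.induct with
  | case1 best i is j js best' hlt ih =>
      rw [tpLoop]
      simp only [if_pos hlt]
      exact le_trans ih (min_le_left _ _)
  | case2 best i is j js best' hlt ih =>
      rw [tpLoop]
      simp only [if_neg hlt]
      exact le_trans ih (min_le_left _ _)
  | case3 best xs ys h => rw [tpLoop.eq_def]; split <;> first | (exfalso; exact h _ _ _ _ rfl rfl) | exact le_refl _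

lemma tp_mem : ∀ (best : Int) (xs ys : List Int),
    tpLoop best xs ys = best ∨ ∃ i ∈ xs, ∃ j ∈ ys, tpLoop best xs ys = |i - j| := by
  intro best xs ys
  induction best, xs, ys using tpLoop.induct with
  | case1 best i is j js best' hlt ih =>
      rw [tpLoop]
      simp only [if_pos hlt]
      rcases ih with h | ⟨i', hi', j', hj', h⟩
      · rw [h]
        rcases min_cases best |i - j| with ⟨hm, _⟩ | ⟨hm, _⟩
        · exact Or.inl hm
        · exact Or.inr ⟨i, List.mem_cons_self, j, List.mem_cons_self, hm⟩
      · exact Or.inr ⟨i', List.mem_cons_of_mem _ hi', j', hj', h⟩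
  | case2 best i is j js best' hlt ih =>
      rw [tpLoop]
      simp only [if_neg hlt]
      rcases ih with h | ⟨i', hi', j', hj', h⟩
      · rw [h]
        rcases min_cases best |i - j| with ⟨hm, _⟩ | ⟨hm, _⟩
        · exact Or.inl hm
        · exact Or.inr ⟨i, List.mem_cons_self, j, List.mem_cons_self, hm⟩
      · exact Or.inr ⟨i', hi', j', List.mem_cons_of_mem _ hj', h⟩
  | case3 best xs ys h => rw [tpLoop.eq_def]; split <;> first | (exfalso; exact h _ _ _ _ rfl rfl) | exact Or.inl rfl

lemma tp_le_pair : ∀ (best : Int) (xs ys : List Int),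
    xs.Pairwise (· < ·) → ys.Pairwise (· < ·) →
    ∀ i ∈ xs, ∀ j ∈ ys, tpLoop best xs ys ≤ |i - j| := by
  intro best xs ys
  induction best, xs, ys using tpLoop.induct with
  | case1 best i0 is j0 js best' hlt ih =>
      intro hxs hys i hi j hj
      rw [tpLoop]
      simp only [if_pos hlt]
      rcases List.mem_cons.mp hi with hi | hi
      · subst hi
        have hjge : j0 ≤ j := by
          rcases List.mem_cons.mp hj with h | h
          · omega
          · exact le_of_lt (List.rel_of_pairwise_cons hys h)
        have h1 : tpLoop (min best |i - j0|) is (j0 :: js) ≤ |i - j0| :=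
          le_trans (tp_le_best _ _ _) (min_le_right _ _)
        have h2 : |i - j0| ≤ |i - j| := by
          rw [pv_abs_of_le (le_of_lt hlt), pv_abs_of_le (by omega : i ≤ j)]; omega
        exact le_trans h1 h2
      · exact ih hxs.tail hys i hi j hj
  | case2 best i0 is j0 js best' hlt ih =>
      intro hxs hys i hi j hj
      rw [tpLoop]
      simp only [if_neg hlt]
      rcases List.mem_cons.mp hj with hj | hj
      · subst hj
        have hige : i0 ≤ i := by
          rcases List.mem_cons.mp hi with h | h
          · omega
          · exact le_of_lt (List.rel_of_pairwise_cons hxs h)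
        have h1 : tpLoop (min best |i0 - j|) (i0 :: is) js ≤ |i0 - j| :=
          le_trans (tp_le_best _ _ _) (min_le_right _ _)
        have h2 : |i0 - j| ≤ |i - j| := by
          rw [abs_of_nonneg (by omega : (0:Int) ≤ i0 - j), abs_of_nonneg (by omega : (0:Int) ≤ i - j)]; omega
        exact le_trans h1 h2
      · exact ih hxs hys.tail i hi j hj
  | case3 best xs ys h =>
      intro hxs hys i hi j hj
      rcases xs with _ | ⟨i0, is⟩
      · simp at hi
      · rcases ys with _ | ⟨j0, js⟩
        · simp at hj
        · exact (h i0 is j0 js rfl rfl).elim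

-- membership and sortedness of the occurrence-index lists of B
lemma pv_mem_idx {lst : List String} {q : String → Prop} [DecidablePred q]
    (i : Int) :
    i ∈ (PySem.List.enumerate lst 0).filterMap (fun p => if q p.2 then some p.1 else none) ↔
      ∃ k : Nat, k < lst.length ∧ i = (k : Int) ∧ q (lst.getD k "") := by
  simp only [List.mem_filterMap, PySem.List.mem_enumerate_iff]
  constructor
  · rintro ⟨p, ⟨k, hk, rfl⟩, hp⟩
    split_ifs at hp with hq
    · simp only [Option.some.injEq] at hp
      exact ⟨k, hk, by omega, by rwa [List.getD_eq_getElem _ _ hk]⟩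
  · rintro ⟨k, hk, rfl, hq⟩
    refine ⟨((k : Int), lst[k]), ⟨k, hk, by simp⟩, ?_⟩
    rw [List.getD_eq_getElem _ _ hk] at hq
    simp [hq]

lemma pv_sorted_idx (lst : List String) (f : Int × String → Option Int)
    (hf : ∀ p i, f p = some i → i = p.1) :
    ((PySem.List.enumerate lst 0).filterMap f).Pairwise (· < ·) := by
  rw [List.pairwise_filterMap]
  refine (PySem.List.pairwise_lt_enumerate lst 0).imp ?_
  intro a b hab x hx y hy
  rw [hf a x hx, hf b y hy]; exact hab

-- ===== VERDICT (by name: the statement is the Claim_ definition above) =====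
theorem distbw2words_spec : Claim_equal_distbw2words := by
  intro lst word_lst _hdom _hpre
  unfold Spec_distbw2words
  by_cases hnil : lst = []
  · subst hnil
    rw [distbw2words_eq_fold]
    simp only [List.length_nil, pvFoldA_zero]
    rfl
  · rw [distbw2words_eq_fold]
    unfold distbw2words_alt
    simp only [if_neg hnil]
    set w1 := PySem.List.pyGetD word_lst 0 "" with hw1
    set w2 := PySem.List.pyGetD word_lst 1 "" with hw2
    set idx1 := (PySem.List.enumerate lst 0).filterMap
      (fun p => if p.2 = w1 then some p.1 else none) with hidx1
    set idx2 := (PySem.List.enumerate lst 0).filterMap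
      (fun p => if p.2 = w2 ∧ ¬ p.2 = w1 then some p.1 else none) with hidx2
    have hmem1 : ∀ i : Int, i ∈ idx1 ↔ ∃ k : Nat, k < lst.length ∧ i = (k : Int) ∧ pvP1 lst word_lst k := by
      intro i; rw [hidx1]; exact pv_mem_idx (q := fun s => s = w1) i
    have hmem2 : ∀ i : Int, i ∈ idx2 ↔ ∃ k : Nat, k < lst.length ∧ i = (k : Int) ∧ pvP2 lst word_lst k := by
      intro i
      rw [hidx2]
      rw [pv_mem_idx (q := fun s => s = w2 ∧ ¬ s = w1) i]
      unfold pvP2 pvP1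
      constructor
      · rintro ⟨k, hk, rfl, hq⟩; exact ⟨k, hk, rfl, hq.2, hq.1⟩
      · rintro ⟨k, hk, rfl, hq1, hq2⟩; exact ⟨k, hk, rfl, hq2, hq1⟩
    have hs1 : idx1.Pairwise (· < ·) := by
      rw [hidx1]
      exact pv_sorted_idx lst _ (by intro p i h; split_ifs at h with _; simp_all)
    have hs2 : idx2.Pairwise (· < ·) := by
      rw [hidx2]
      exact pv_sorted_idx lst _ (by intro p i h; split_ifs at h with _; simp_all)
    obtain ⟨_, _, C3, C4, C5⟩ := pvInv lst word_lst lst.length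
    rw [show (9223372036854775807 : Int) = pvM from rfl]
    apply le_antisymm
    · -- A ≤ B
      rcases tp_mem pvM idx1 idx2 with h | ⟨i, hi, j, hj, h⟩
      · rw [h]; exact C3
      · rw [h]
        obtain ⟨k1, hk1, rfl, hp1⟩ := (hmem1 i).mp hi
        obtain ⟨k2, hk2, rfl, hp2⟩ := (hmem2 j).mp hj
        exact C5 k1 k2 hk1 hk2 hp1 hp2
    · -- B ≤ A
      rcases C4 with h | ⟨i, j, hi, hj, hpi, hpj, h⟩
      · rw [h]; exact tp_le_best _ _ _
      · rw [h]
        exact tp_le_pair pvM idx1 idx2 hs1 hs2 _ ((hmem1 _).mpr ⟨i, hi, rfl, hpi⟩)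
          _ ((hmem2 _).mpr ⟨j, hj, rfl, hpj⟩)
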